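-- pv_equiv track=rewrite | github.com/msolorio/python_code_challenges | codepeace/19-alphabet-game.py | get_winner2
-- ===== SOURCE A (Python) =====
-- right_letters = {
--   'm': 4,
--   'q': 3,
--   'd': 2,
--   'z': 1
-- }
--
-- def get_winner2(word, left_letters, right_lettes):
--   points = 0
--
--   for letter in word:
--     points -= left_letters.get(letter, 0)
--     points += right_letters.get(letter, 0)
--
--   if points < 0: return 'Left side wins!'
--   if points > 0: return 'Right side wins!'
--   return 'Let\'s play again!'
-- ===== SOURCE B (Python) =====
-- right_letters = {
--   'm': 4,
--   'q': 3,
--   'd': 2,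
--   'z': 1
-- }
--
-- def get_winner2(word, left_letters, right_lettes):
--   # Inverted loops: instead of scanning the word once with two dict lookups
--   # per character (A), score each SIDE by iterating over its dict's few
--   # entries and counting that key's occurrences in the word, then compare
--   # the two side totals.  Like A, the module constant right_letters is used
--   # (A's right_lettes parameter is a typo and unused).
--   def total(table):
--     return sum(v * sum(1 for c in word if c == k) for k, v in table.items())
--   left = total(left_letters)
--   right = total(right_letters)
--   if left > right: return 'Left side wins!'
--   if right > left: return 'Right side wins!'
--   return 'Let\'s play again!'
-- ===== Notes on version B (the rewrite author's own statement) =====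
-- stated objective: alternative
-- what changed: B inverts the loops: instead of A's single scan over the word with two dict lookups per character accumulating a signed score, B scores each side separately by iterating over that side's dict entries and counting each key's occurrences in the word, then compares the left and right totals.
import Mathlib
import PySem

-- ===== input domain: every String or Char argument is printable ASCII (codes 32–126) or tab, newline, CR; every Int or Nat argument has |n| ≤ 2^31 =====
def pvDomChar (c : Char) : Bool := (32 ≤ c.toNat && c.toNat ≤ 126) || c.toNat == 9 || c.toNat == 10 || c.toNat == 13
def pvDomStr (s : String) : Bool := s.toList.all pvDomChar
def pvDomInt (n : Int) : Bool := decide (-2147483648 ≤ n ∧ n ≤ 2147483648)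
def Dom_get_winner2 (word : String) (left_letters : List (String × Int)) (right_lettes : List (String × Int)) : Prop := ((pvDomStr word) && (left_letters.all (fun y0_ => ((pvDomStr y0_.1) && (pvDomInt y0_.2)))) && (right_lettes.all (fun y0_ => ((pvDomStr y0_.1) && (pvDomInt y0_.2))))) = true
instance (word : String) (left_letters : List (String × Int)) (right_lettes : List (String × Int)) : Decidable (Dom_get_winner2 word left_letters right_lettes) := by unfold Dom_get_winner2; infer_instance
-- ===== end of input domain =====

-- B inverts the loops: instead of A's single scan over the word with two dict lookups per
-- character accumulating a signed score, B scores each side by iterating over that side's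
-- dict entries, counting each key's occurrences in the word, and compares the two totals.
-- Like the Python A, both sides read the module constant right_letters (A's parameter
-- `right_lettes` is a typo and unused by A's body, hence by B's too).

-- ===== PORT A =====
-- the module-level constant `right_letters` that A's body reads (its parameter is `right_lettes`)
def pvRightLetters : PySem.Dict String Int :=
  PySem.Dict.ofList [("m", 4), ("q", 3), ("d", 2), ("z", 1)]

def get_winner2 (word : String) (left_letters : List (String × Int)) (right_lettes : List (String × Int)) : String :=
  let _ := right_lettes  -- parameter unused by A's body (typo'd name)
  let ld : PySem.Dict String Int := PySem.Dict.ofList left_letters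
  let points : Int := word.toList.foldl
    (fun points c =>
      points - ld.getD (String.singleton c) 0 + pvRightLetters.getD (String.singleton c) 0) 0
  if points < 0 then "Left side wins!"
  else if points > 0 then "Right side wins!"
  else "Let's play again!"

-- ===== PORT B =====
-- Source B's helper `total(table)`: sum of v * (number of characters of word equal to k)
-- over the entries (k, v) of the dict
def pvSideTotal (word : String) (table : PySem.Dict String Int) : Int :=
  (table.items.map
    (fun kv => kv.2 * ((word.toList.filter (fun c => String.singleton c == kv.1)).length : Int))).sum

def get_winner2_alt (word : String) (left_letters : List (String × Int)) (right_lettes : List (String × Int)) : String :=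
  let _ := right_lettes
  let left : Int := pvSideTotal word (PySem.Dict.ofList left_letters)
  let right : Int := pvSideTotal word pvRightLetters
  if left > right then "Left side wins!"
  else if right > left then "Right side wins!"
  else "Let's play again!"

-- ===== PRECONDITION & SPEC =====
def Spec_get_winner2 (word : String) (left_letters : List (String × Int)) (right_lettes : List (String × Int)) (out : String) : Prop := out = get_winner2_alt word left_letters right_lettes
instance (word : String) (left_letters : List (String × Int)) (right_lettes : List (String × Int)) (out : String) : Decidable (Spec_get_winner2 word left_letters right_lettes out) := by unfold Spec_get_winner2; infer_instance

-- ===== CLAIM (what is proved, stated in full; the proofs are below) =====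
def Claim_equal_get_winner2 : Prop := ∀ (word : String) (left_letters : List (String × Int)) (right_lettes : List (String × Int)), Dom_get_winner2 word left_letters right_lettes → Spec_get_winner2 word left_letters right_lettes (get_winner2 word left_letters right_lettes)

-- ===== LEMMAS AND PROOFS =====

-- A's fold is the difference of the two per-character sums
theorem foldl_sub_add_eq (L R : Char → Int) (cs : List Char) (a : Int) :
    cs.foldl (fun p c => p - L c + R c) a
      = a + (cs.map R).sum - (cs.map L).sum := by
  induction cs generalizing a with
  | nil => simp
  | cons c cs ih => simp [List.foldl_cons, ih]; ring

-- picking out the unique occurrence of y in a nodup list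
theorem sum_map_ite_mem (g : String → Int) (ks : List String) (hk : ks.Nodup) (y : String)
    (hy : y ∈ ks) : (ks.map (fun k => if y = k then g k else 0)).sum = g y := by
  induction ks with
  | nil => simp at hy
  | cons k ks ih =>
    obtain ⟨hk1, hk2⟩ := List.nodup_cons.mp hk
    rcases List.mem_cons.mp hy with h | h
    · subst h
      simp only [List.map_cons, List.sum_cons]
      have hz : (ks.map (fun k' => if y = k' then g k' else 0)).sum = 0 := by
        apply List.sum_eq_zero; intro x hx
        obtain ⟨x', hx', rfl⟩ := List.mem_map.mp hx
        have : ¬ (y = x') := fun e => hk1 (e ▸ hx')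
        simp [this]
      simp [hz]
    · have hne : ¬ (y = k) := fun e => hk1 (e ▸ h)
      simp [hne, ih hk2 h]

theorem sum_map_ite_not_mem (g : String → Int) (ks : List String) (y : String)
    (hy : y ∉ ks) : (ks.map (fun k => if y = k then g k else 0)).sum = 0 := by
  apply List.sum_eq_zero; intro x hx
  obtain ⟨x', hx', rfl⟩ := List.mem_map.mp hx
  have : ¬ (y = x') := fun e => hy (e ▸ hx')
  simp [this]

-- the per-character sum of lookups in d equals the per-key weighted count
theorem char_sum_eq_key_sum (d : PySem.Dict String Int) (hnd : d.keys.Nodup) (cs : List Char) :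
    (cs.map (fun c => d.getD (String.singleton c) 0)).sum
      = (d.keys.map (fun k =>
          d.getD k 0 * ((cs.filter (fun c => String.singleton c == k)).length : Int))).sum := by
  induction cs with
  | nil => simp
  | cons c cs ih =>
    have hsplit : ∀ k : String,
        d.getD k 0 * (((c :: cs).filter (fun c' => String.singleton c' == k)).length : Int)
          = (if String.singleton c = k then d.getD k 0 else 0)
            + d.getD k 0 * ((cs.filter (fun c' => String.singleton c' == k)).length : Int) := by
      intro k
      by_cases h : String.singleton c = k
      · simp [h]; ring
      · have hb : (String.singleton c == k) = false := by simp [h]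
        simp [hb, h]
    simp only [List.map_cons, List.sum_cons, ih, hsplit, List.sum_map_add]
    congr 1
    by_cases hm : String.singleton c ∈ d.keys
    · exact (sum_map_ite_mem (fun k => d.getD k 0) d.keys hnd (String.singleton c) hm).symm
    · have h0 : d.getD (String.singleton c) 0 = 0 := by
        apply PySem.Dict.getD_of_not_contains
        rw [PySem.Dict.contains_eq_decide_mem_keys]
        simp [hm]
      rw [h0, sum_map_ite_not_mem (fun k => d.getD k 0) d.keys (String.singleton c) hm]

-- B's side total, rewritten through keys
theorem sideTotal_eq (word : String) (d : PySem.Dict String Int) (hnd : d.keys.Nodup) :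
    pvSideTotal word d
      = (word.toList.map (fun c => d.getD (String.singleton c) 0)).sum := by
  rw [pvSideTotal, PySem.Dict.items_eq_map_keys d hnd 0, List.map_map,
      char_sum_eq_key_sum d hnd word.toList]
  rfl

-- ===== VERDICT (by name: the statement is the Claim_ definition above) =====
theorem get_winner2_spec : Claim_equal_get_winner2 := by
  intro word left_letters right_lettes _hdom
  unfold Spec_get_winner2
  dsimp only [get_winner2, get_winner2_alt]
  rw [foldl_sub_add_eq,
      sideTotal_eq word (PySem.Dict.ofList left_letters) (PySem.Dict.nodup_keys_ofList left_letters),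
      sideTotal_eq word pvRightLetters (PySem.Dict.nodup_keys_ofList _)]
  set SL := (word.toList.map
    (fun c => (PySem.Dict.ofList left_letters).getD (String.singleton c) 0)).sum with hSL
  set SR := (word.toList.map (fun c => pvRightLetters.getD (String.singleton c) 0)).sum with hSR
  by_cases h1 : 0 + SR - SL < 0
  · rw [if_pos h1, if_pos (by omega : SL > SR)]
  · rw [if_neg h1]
    by_cases h2 : 0 + SR - SL > 0
    · rw [if_pos h2, if_neg (by omega : ¬ SL > SR), if_pos (by omega : SR > SL)]
    · rw [if_neg h2, if_neg (by omega : ¬ SL > SR), if_neg (by omega : ¬ SR > SL)]
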